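-- pv_equiv track=rewrite | github.com/nickwilmes/AOC | 2024/day4.py | find_diangle_lines
-- ===== SOURCE A (Python) =====
-- def find_diangle_lines(grid: list[str]) -> list[str]:
--     diagonals = {}
--     rows = len(grid)
--     cols = len(grid[0])
--
--     for y in range(rows):
--         for x in range(cols):
--             diff = y-x
--             c = grid[y][x]
--
--             if diff not in diagonals:
--                 diagonals[diff] = []
--
--             diagonals[diff].insert(0, c)
--
--     new_grid = ["".join(diagonals[key]) for key in sorted(diagonals.keys())]
--
--     return new_grid
-- ===== SOURCE B (Python) =====
-- def find_diangle_lines(grid: list[str]) -> list[str]: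
--     rows = len(grid)
--     cols = len(grid[0])
--     if cols == 0:
--         return []
--     out = []
--     for d in range(-(cols - 1), rows):
--         lo = max(0, d)
--         hi = min(rows - 1, d + cols - 1)
--         out.append("".join(grid[y][y - d] for y in reversed(range(lo, hi + 1))))
--     return out
-- ===== Notes on version B (the rewrite author's own statement) =====
-- stated objective: alternative
-- what changed: Replaces A's dict bucketing of every cell by y-x followed by sorting the keys with a direct loop over the diagonal offsets in ascending order, building each anti-diagonal string by a reversed range walk over its valid rows.
import Mathlib
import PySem

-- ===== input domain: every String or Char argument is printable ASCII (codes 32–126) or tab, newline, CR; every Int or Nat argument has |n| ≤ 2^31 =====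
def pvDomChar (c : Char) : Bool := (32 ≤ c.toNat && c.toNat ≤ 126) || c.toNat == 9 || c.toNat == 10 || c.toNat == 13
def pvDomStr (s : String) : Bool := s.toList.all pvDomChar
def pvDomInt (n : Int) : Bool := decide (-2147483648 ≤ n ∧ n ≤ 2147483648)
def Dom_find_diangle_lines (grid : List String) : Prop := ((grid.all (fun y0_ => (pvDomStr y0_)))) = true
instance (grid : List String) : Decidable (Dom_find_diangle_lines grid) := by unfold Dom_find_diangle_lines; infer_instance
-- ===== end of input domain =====

-- B replaces A's dict-bucketing-by-(y-x)-then-sort-keys with a direct ascending loop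
-- over diagonal offsets, reading each anti-diagonal via a reversed range walk (alternative decomposition).


-- ===== PORT A =====
-- grid[y][x] (both indexings raise only outside Pre_, so the total pyGetD form is exact on Pre_).
def find_diangle_lines (grid : List String) : List String :=
  let rows : Int := grid.length
  let cols : Int := PySem.Str.len (PySem.List.pyGetD grid 0 "")
  let diagonals : PySem.Dict Int (List Char) :=
    (PySem.List.pyRange 0 rows 1).foldl (fun d y =>
      (PySem.List.pyRange 0 cols 1).foldl (fun d x =>
        let diff := y - x
        let c : Char := PySem.List.pyGetD (PySem.List.pyGetD grid y "").toList x ' '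
        -- 'if diff not in diagonals: diagonals[diff] = []'
        let d := if d.contains diff then d else d.insert diff ([] : List Char)
        -- 'diagonals[diff].insert(0, c)' (key is present here)
        d.modify diff [] (fun l => c :: l)) d)
      PySem.Dict.empty
  -- '"".join' of a list of the single characters is the string of those characters;
  -- 'diagonals[key]' is ported as getD (the key is always present).
  (PySem.List.sorted diagonals.keys (fun k => k) false).map
    (fun k => String.ofList (diagonals.getD k []))

-- ===== PORT B =====
def find_diangle_lines_alt (grid : List String) : List String :=
  let rows : Int := grid.length
  let cols : Int := PySem.Str.len (PySem.List.pyGetD grid 0 "")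
  if cols == 0 then []
  else
    (PySem.List.pyRange (-(cols - 1)) rows 1).map (fun d =>
      let lo : Int := max 0 d
      let hi : Int := min (rows - 1) (d + cols - 1)
      String.ofList ((PySem.List.pyRange lo (hi + 1) 1).reverse.map (fun y =>
        PySem.List.pyGetD (PySem.List.pyGetD grid y "").toList (y - d) ' ')))

-- ===== PRECONDITION & SPEC =====
-- Pre_ is exactly where Python A returns: a nonempty grid whose every row is at least
-- as long as the first row (otherwise grid[0] or grid[y][x] raises IndexError).
def Pre_find_diangle_lines (grid : List String) : Prop :=
  grid ≠ [] ∧ ∀ s ∈ grid, (grid.headD "").toList.length ≤ s.toList.length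
instance (grid : List String) : Decidable (Pre_find_diangle_lines grid) := by
  unfold Pre_find_diangle_lines; infer_instance
def pvWitness_find_diangle_lines : List String := ["ab", "cd", "ef"]

def Spec_find_diangle_lines (grid : List String) (out : List String) : Prop := out = find_diangle_lines_alt grid
instance (grid : List String) (out : List String) : Decidable (Spec_find_diangle_lines grid out) := by unfold Spec_find_diangle_lines; infer_instance

-- ===== CLAIM (what is proved, stated in full; the proofs are below) =====
def Claim_equal_find_diangle_lines : Prop := ∀ (grid : List String), Dom_find_diangle_lines grid → Pre_find_diangle_lines grid → Spec_find_diangle_lines grid (find_diangle_lines grid)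

-- ===== LEMMAS AND PROOFS =====

-- the character A reads at cell (y, x) (shorthand used only by the proofs)
def pvCell (grid : List String) (y x : Int) : Char :=
  PySem.List.pyGetD (PySem.List.pyGetD grid y "").toList x ' '

theorem pv_setdefault_modify {κ ν : Type} [BEq κ] [LawfulBEq κ]
    (d : PySem.Dict κ ν) (k : κ) (v0 : ν) (f : ν → ν) :
    (if d.contains k then d else d.insert k v0).modify k v0 f = d.modify k v0 f := by
  by_cases h : d.contains k
  · simp [h]
  · simp only [h, Bool.false_eq_true, if_false]
    apply PySem.Dict.ext
    have h' : ∀ p ∈ d.items, (p.1 == k) = false := by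
      intro p hp
      by_contra hc
      simp only [Bool.not_eq_false, beq_iff_eq] at hc
      refine h ?_
      simp only [PySem.Dict.contains, List.any_eq_true]
      exact ⟨p, hp, by simp [hc]⟩
    have hany : (d.items.any fun p => p.1 == k) = false := by
      simp only [List.any_eq_false]
      intro p hp; simp [h' p hp]
    have hfind : List.find? (fun p => p.1 == k) d.items = none :=
      List.find?_eq_none.mpr (by intro p hp; simp [h' p hp])
    have hmap : ∀ v : ν, d.items.map (fun p => if (p.1 == k) = true then (k, v) else p) = d.items := by
      intro v
      apply List.map_congr_left ?_ |>.trans (List.map_id _)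
      intro p hp; simp [h' p hp]
    simp [PySem.Dict.modify, PySem.Dict.insert, PySem.Dict.contains,
      PySem.Dict.getD, PySem.Dict.get?, hany, hfind, hmap, List.any_append,
      List.find?_append, List.map_append]

theorem pv_getD_foldl_modify_cons {α : Type} (l : List α) (key : α → Int) (f : α → Char)
    (d : PySem.Dict Int (List Char)) (c : Int) :
    ((l.foldl (fun d p => d.modify (key p) [] (fun u => f p :: u)) d).getD c []) =
      ((l.filter (fun p => key p == c)).map f).reverse ++ d.getD c [] := by
  induction l generalizing d with
  | nil => simp
  | cons p t ih =>
    simp only [List.foldl_cons, List.filter_cons]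
    rw [ih]
    by_cases hk : key p = c
    · simp [hk, PySem.Dict.getD_modify_self]
    · have hb : (key p == c) = false := by simp [hk]
      have hne : c ≠ key p := fun hc => hk hc.symm
      simp [hb, PySem.Dict.getD_modify_of_ne _ _ _ hne]

theorem pv_filter_pyRange_eq (a b v : Int) :
    (PySem.List.pyRange a b 1).filter (fun x => x == v) =
      if a ≤ v ∧ v < b then [v] else [] := by
  by_cases hab : b ≤ a
  · rw [PySem.List.pyRange_one_eq_nil hab]
    simp; omega
  · have hab' : a < b := lt_of_not_ge hab
    have hn : b = a + ((b - a).toNat : Int) := by omega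
    generalize hgen : (b - a).toNat = n at hn
    subst hn
    clear hgen hab hab'
    induction n generalizing a with
    | zero => simp
    | succ m ih =>
      rw [PySem.List.pyRange_one_cons (by push_cast; omega)]
      simp only [List.filter_cons]
      have : a + ((m+1 : Nat) : Int) = (a+1) + ((m:Nat):Int) := by push_cast; omega
      rw [this, ih (a+1)]
      by_cases hv : a = v
      · simp only [hv, beq_self_eq_true, if_true]
        split_ifs <;> try rfl
        all_goals omega
      · have : (a == v) = false := by simp [hv]
        simp only [this, Bool.false_eq_true, if_false]
        split_ifs <;> try rfl
        all_goals omega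

theorem pv_flatMap_if_range {α : Type} (n : Nat) (a c e : Int) (f : Int → α) :
    ((PySem.List.pyRange a (a + n) 1).flatMap
        (fun y => if c ≤ y ∧ y < e then [f y] else [])) =
      (PySem.List.pyRange (max a c) (min (a + n) e) 1).map f := by
  induction n with
  | zero =>
    rw [PySem.List.pyRange_one_eq_nil (by omega), PySem.List.pyRange_one_eq_nil (by omega)]
    rfl
  | succ m ih =>
    have h1 : (a : Int) + ((m+1 : Nat) : Int) = (a + (m:Nat)) + 1 := by push_cast; omega
    rw [h1, PySem.List.pyRange_one_succ_right (by omega), List.flatMap_append, ih]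
    simp only [List.flatMap_cons, List.flatMap_nil, List.append_nil]
    by_cases hc : c ≤ a + (m:Nat) ∧ a + (m:Nat) < e
    · rw [if_pos hc]
      have h2 : min ((a + (m:Nat)) + 1) e = min (a + (m:Nat)) e + 1 := by omega
      have h3 : min (a + (m:Nat)) e = a + (m:Nat) := by omega
      rw [h2, PySem.List.pyRange_one_succ_right (by omega), List.map_append, h3]
      simp
    · rw [if_neg hc]
      simp only [List.append_nil]
      by_cases he : e ≤ a + (m:Nat)
      · have : min ((a + (m:Nat)) + 1) e = min (a + (m:Nat)) e := by omega
        rw [this]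
      · rw [PySem.List.pyRange_one_eq_nil (by omega), PySem.List.pyRange_one_eq_nil (by omega)]

-- the bucket dict built by A, as a single fold over all cells
theorem pv_main (grid : List String) (hne : grid ≠ [])
    (hlen : ∀ s ∈ grid, (grid.headD "").toList.length ≤ s.toList.length) :
    find_diangle_lines grid = find_diangle_lines_alt grid := by
  obtain ⟨r0, rest, rfl⟩ : ∃ r0 rest, grid = r0 :: rest := by
    cases grid with
    | nil => exact absurd rfl hne
    | cons a t => exact ⟨a, t, rfl⟩
  simp only [find_diangle_lines, find_diangle_lines_alt, PySem.List.pyGetD_ofNat',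
    List.getD_cons_zero, PySem.Str.len_eq]
  by_cases hC : r0.toList.length = 0
  · -- empty first row: no cells, A builds the empty dict, B returns []
    rw [hC]
    norm_num
  · have hCb : ((r0.toList.length : Int) == 0) = false := by
      simp only [beq_eq_false_iff_ne, ne_eq, Nat.cast_eq_zero]; exact hC
    rw [if_neg (by rw [hCb]; exact Bool.false_ne_true)]
    -- abbreviations
    set G : List String := r0 :: rest with hG
    set R : Int := ((r0 :: rest).length : Int) with hRdef
    set C : Int := (r0.toList.length : Int) with hCdef
    have hR1 : 1 ≤ R := by simp [hRdef]
    have hC1 : 1 ≤ C := by rw [hCdef]; omega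
    -- the cell list and the single-fold dict
    set key : Int × Int → Int := fun p => p.1 - p.2 with hkey
    set cells : List (Int × Int) :=
      (PySem.List.pyRange 0 R 1).flatMap
        (fun y => (PySem.List.pyRange 0 C 1).map (fun x => (y, x))) with hcells
    set step : PySem.Dict Int (List Char) → Int × Int → PySem.Dict Int (List Char) :=
      fun d p => d.modify (key p) [] (fun l => pvCell G p.1 p.2 :: l) with hstep
    have hD : (List.foldl
          (fun d y =>
            List.foldl
              (fun d x =>
                (if d.contains (y - x) = true then d else d.insert (y - x) []).modify (y - x) []
                  fun l => PySem.List.pyGetD (PySem.List.pyGetD G y "").toList x ' ' :: l)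
              d (PySem.List.pyRange 0 C 1))
          PySem.Dict.empty (PySem.List.pyRange 0 R 1))
        = cells.foldl step PySem.Dict.empty := by
      rw [hcells, List.foldl_flatMap]
      simp only [List.foldl_map, pv_setdefault_modify, hstep, hkey, pvCell]
    rw [hD]
    -- keys of the bucket dict
    have hkeys : (cells.foldl step PySem.Dict.empty).keys = PySem.Set.ofList (cells.map key) := by
      rw [hstep]
      rw [PySem.Dict.keys_foldl_modify_key cells key [] (fun _ p => fun l => pvCell G p.1 p.2 :: l)]
      rw [PySem.Dict.keys_empty, PySem.Set.ofList_eq_foldl]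
      rfl
    have hnodup : (cells.foldl step PySem.Dict.empty).keys.Nodup := by
      rw [hstep]
      exact PySem.Dict.nodup_keys_foldl_modify_key _ _ _ _ _ (by simp [PySem.Dict.keys_empty])
    have hmemkeys : ∀ k : Int, k ∈ cells.map key ↔ (-(C - 1) ≤ k ∧ k < R) := by
      intro k
      constructor
      · rintro hk
        rw [List.mem_map] at hk
        obtain ⟨p, hp, rfl⟩ := hk
        rw [hcells, List.mem_flatMap] at hp
        obtain ⟨y, hy, hx⟩ := hp
        rw [List.mem_map] at hx
        obtain ⟨x, hx, rfl⟩ := hx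
        rw [PySem.List.mem_pyRange_one] at hy hx
        simp only [hkey]
        omega
      · rintro ⟨h1, h2⟩
        rw [List.mem_map]
        refine ⟨(max k 0, max k 0 - k), ?_, by simp [hkey]⟩
        rw [hcells, List.mem_flatMap]
        refine ⟨max k 0, ?_, ?_⟩
        · rw [PySem.List.mem_pyRange_one]; omega
        · rw [List.mem_map]
          exact ⟨max k 0 - k, by rw [PySem.List.mem_pyRange_one]; omega, rfl⟩
    have hsorted : PySem.List.sorted (cells.foldl step PySem.Dict.empty).keys (fun k => k) =
        PySem.List.pyRange (-(C - 1)) R 1 := by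
      apply PySem.List.sorted_eq_of_perm_of_pairwise_lt
      · apply (List.perm_ext_iff_of_nodup (PySem.List.nodup_pyRange_one _ _) hnodup).mpr
        intro k
        rw [PySem.List.mem_pyRange_one, hkeys, PySem.Set.mem_ofList, hmemkeys]
      · exact PySem.List.pairwise_lt_pyRange_one _ _
    rw [hsorted]
    -- the bucket at each key
    have hgetD : ∀ k : Int, (cells.foldl step PySem.Dict.empty).getD k [] =
        ((cells.filter (fun p => key p == k)).map (fun p => pvCell G p.1 p.2)).reverse := by
      intro k
      rw [hstep, pv_getD_foldl_modify_cons cells key (fun p => pvCell G p.1 p.2)]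
      simp [PySem.Dict.getD_empty]
    have hfilter : ∀ k : Int, cells.filter (fun p => key p == k) =
        (PySem.List.pyRange (max 0 k) (min R (k + C)) 1).map (fun y => (y, y - k)) := by
      intro k
      rw [hcells, List.filter_flatMap]
      have hinner : ∀ y : Int, ((PySem.List.pyRange 0 C 1).map (fun x => (y, x))).filter
          (fun p => key p == k) = if k ≤ y ∧ y < k + C then [(y, y - k)] else [] := by
        intro y
        rw [List.filter_map]
        have hcong : (PySem.List.pyRange 0 C 1).filter ((fun p => key p == k) ∘ (fun x => (y, x))) =
            (PySem.List.pyRange 0 C 1).filter (fun x => x == y - k) := by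
          apply List.filter_congr
          intro x hx
          simp only [Function.comp, hkey]
          by_cases h : x = y - k
          · subst h; simp [show y - (y - k) = k by omega]
          · have h1 : (y - x == k) = false := by simp; omega
            have h2 : (x == y - k) = false := by simp [h]
            rw [h1, h2]
        rw [hcong, pv_filter_pyRange_eq]
        by_cases hcnd : k ≤ y ∧ y < k + C
        · rw [if_pos (by omega), if_pos hcnd]; rfl
        · rw [if_neg (by omega), if_neg hcnd]; rfl
      simp only [hinner]
      have hcast : R = 0 + ((R.toNat : Nat) : Int) := by omega
      rw [show PySem.List.pyRange 0 R 1 = PySem.List.pyRange 0 (0 + ((R.toNat : Nat) : Int)) 1 by rw [← hcast]]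
      rw [pv_flatMap_if_range R.toNat 0 k (k + C) (fun y => (y, y - k))]
      rw [← hcast]
    -- pointwise equality of the two maps
    apply List.map_congr_left
    intro k hk
    rw [PySem.List.mem_pyRange_one] at hk
    rw [hgetD k, hfilter k, List.map_map]
    rw [List.map_reverse]
    rw [show min (R - 1) (k + C - 1) + 1 = min R (k + C) from by omega]
    rfl

-- ===== VERDICT (by name: the statement is the Claim_ definition above) =====
theorem find_diangle_lines_spec : Claim_equal_find_diangle_lines := by
  intro grid _ hpre
  unfold Pre_find_diangle_lines at hpre
  unfold Spec_find_diangle_lines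
  exact pv_main grid hpre.1 hpre.2
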